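-- pv_equiv track=rewrite | github.com/xjessejohnson/ThreatIntelCorrelator | src/correlation.py | correlate_iocs
-- ===== SOURCE A (Python) =====
-- def correlate_iocs(ioc_lists):
--     """Correlates IOCs from multiple lists with improved logic."""
--     if not ioc_lists:
--         return []
--
--     all_iocs = []
--     for ioc_list in ioc_lists:
--         all_iocs.extend(ioc_list)
--
--     ioc_counts = {}
--     for ioc in all_iocs:
--         ioc_counts[ioc] = ioc_counts.get(ioc, 0) + 1
--
--     correlated_iocs = [ioc for ioc, count in ioc_counts.items() if count > 1] #Iocs that appear more than once.
--
--     return correlated_iocs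
-- ===== SOURCE B (Python) =====
-- def correlate_iocs(ioc_lists):
--     """Correlates IOCs from multiple lists with improved logic."""
--     if not ioc_lists:
--         return []
--
--     all_iocs = [ioc for ioc_list in ioc_lists for ioc in ioc_list]
--
--     seen_once = set()
--     duplicates = set()
--     for ioc in all_iocs:
--         if ioc in seen_once:
--             duplicates.add(ioc)
--         else:
--             seen_once.add(ioc)
--
--     result = []
--     emitted = set()
--     for ioc in all_iocs:
--         if ioc in duplicates and ioc not in emitted:
--             result.append(ioc)
--             emitted.add(ioc)
--     return result
-- ===== Notes on version B (the rewrite author's own statement) =====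
-- stated objective: alternative
-- what changed: Replaces A's count dictionary and items-filter with a single pass building two sets (seen_once/duplicates) followed by a second order-preserving pass that emits each duplicate at its first appearance.
import Mathlib
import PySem

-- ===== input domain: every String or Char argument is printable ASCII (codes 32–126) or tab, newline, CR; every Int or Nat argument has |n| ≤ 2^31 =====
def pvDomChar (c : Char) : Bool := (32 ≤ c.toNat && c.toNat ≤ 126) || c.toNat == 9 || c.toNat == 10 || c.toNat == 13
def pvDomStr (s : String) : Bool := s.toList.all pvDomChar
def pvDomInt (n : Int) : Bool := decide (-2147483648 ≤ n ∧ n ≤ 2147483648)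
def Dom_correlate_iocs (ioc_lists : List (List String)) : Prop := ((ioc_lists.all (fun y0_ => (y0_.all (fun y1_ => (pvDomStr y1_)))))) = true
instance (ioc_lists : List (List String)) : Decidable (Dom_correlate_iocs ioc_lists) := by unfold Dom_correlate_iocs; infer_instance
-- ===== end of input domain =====

-- B replaces A's count dictionary with two sets (seen-once / duplicates) and a second
-- order-preserving emit pass; alternative decomposition, same result.

-- ===== PORT A =====
def correlate_iocs (ioc_lists : List (List String)) : List String :=
  if ioc_lists = [] then []
  else
    let all_iocs : List String := ioc_lists.foldl (fun acc ioc_list => acc ++ ioc_list) []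
    let ioc_counts : PySem.Dict String Int :=
      all_iocs.foldl (fun d ioc => d.insert ioc (d.getD ioc 0 + 1)) PySem.Dict.empty
    (ioc_counts.items.filter (fun p => decide (1 < p.2))).map (fun p => p.1)

-- ===== PORT B =====
-- one pass building (seen_once, duplicates)
def pvDupStep (st : PySem.Set String × PySem.Set String) (ioc : String) :
    PySem.Set String × PySem.Set String :=
  if st.1.contains ioc then (st.1, st.2.add ioc) else (st.1.add ioc, st.2)

-- second pass: emit first sighting of each duplicate, in original order
def pvEmitStep (dups : PySem.Set String) (st : List String × PySem.Set String) (ioc : String) :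
    List String × PySem.Set String :=
  if dups.contains ioc && !(st.2.contains ioc) then (st.1 ++ [ioc], st.2.add ioc) else st

def correlate_iocs_alt (ioc_lists : List (List String)) : List String :=
  if ioc_lists = [] then []
  else
    let all_iocs : List String := ioc_lists.flatMap (fun ioc_list => ioc_list)
    let dups : PySem.Set String :=
      (all_iocs.foldl pvDupStep (PySem.Set.empty, PySem.Set.empty)).2
    (all_iocs.foldl (pvEmitStep dups) ([], PySem.Set.empty)).1

-- ===== PRECONDITION & SPEC =====
def Spec_correlate_iocs (ioc_lists : List (List String)) (out : List String) : Prop := out = correlate_iocs_alt ioc_lists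
instance (ioc_lists : List (List String)) (out : List String) : Decidable (Spec_correlate_iocs ioc_lists out) := by unfold Spec_correlate_iocs; infer_instance

-- ===== CLAIM (what is proved, stated in full; the proofs are below) =====
def Claim_equal_correlate_iocs : Prop := ∀ (ioc_lists : List (List String)), Dom_correlate_iocs ioc_lists → Spec_correlate_iocs ioc_lists (correlate_iocs ioc_lists)

-- ===== LEMMAS AND PROOFS =====

-- A's hand-rolled flatten is flatMap
theorem pv_foldl_append (l : List (List String)) (acc : List String) :
    l.foldl (fun a x => a ++ x) acc = acc ++ l.flatMap (fun x => x) := by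
  induction l generalizing acc with
  | nil => simp
  | cons h t ih => simp [List.foldl_cons, ih, List.append_assoc]

-- first pass: membership in the two sets, characterised by membership/count in the input
theorem pv_dup_fold_mem (l : List String) (seen dups : PySem.Set String) (x : String) :
    (x ∈ (l.foldl pvDupStep (seen, dups)).1 ↔ (x ∈ seen ∨ x ∈ l)) ∧
    (x ∈ (l.foldl pvDupStep (seen, dups)).2 ↔
      (x ∈ dups ∨ (x ∈ seen ∧ x ∈ l) ∨ 2 ≤ l.count x)) := by
  induction l generalizing seen dups with
  | nil => simp
  | cons a t ih =>
    simp only [List.foldl_cons, pvDupStep]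
    by_cases hsa : a ∈ seen
    · have hc : PySem.Set.contains seen a = true := by
        simp [PySem.Set.contains, hsa]
      rw [hc, if_pos rfl]
      rcases ih seen (dups.add a) with ⟨ih1, ih2⟩
      constructor
      · rw [ih1]
        constructor
        · rintro (hs | ht)
          · exact Or.inl hs
          · exact Or.inr (List.mem_cons_of_mem _ ht)
        · rintro (hs | hm)
          · exact Or.inl hs
          · rcases List.mem_cons.mp hm with rfl | ht
            · exact Or.inl hsa
            · exact Or.inr ht
      · rw [ih2, PySem.Set.mem_add]
        by_cases hxa : x = a
        · subst hxa
          simp [hsa]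
        · have hax : ¬ a = x := fun h => hxa h.symm
          simp [hxa, hax, List.count_cons, List.mem_cons]
    · have hc : PySem.Set.contains seen a = false := by
        simp [PySem.Set.contains, hsa]
      rw [hc, if_neg (by simp)]
      rcases ih (seen.add a) dups with ⟨ih1, ih2⟩
      constructor
      · rw [ih1, PySem.Set.mem_add, List.mem_cons]
        tauto
      · rw [ih2, PySem.Set.mem_add]
        by_cases hxa : x = a
        · subst hxa
          have hcnt : (x :: t).count x = t.count x + 1 := List.count_cons_self
          have h1 : x ∈ t ↔ 1 ≤ t.count x :=
            ⟨fun h => List.one_le_count_iff.mpr h, fun h => List.one_le_count_iff.mp h⟩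
          rw [hcnt, List.mem_cons]
          constructor
          · rintro (hd | ⟨(hs | _), ht⟩ | hcc)
            · exact Or.inl hd
            · exact absurd hs hsa
            · exact Or.inr (Or.inr (by have := h1.mp ht; omega))
            · exact Or.inr (Or.inr (by omega))
          · rintro (hd | ⟨hs, _⟩ | hcc)
            · exact Or.inl hd
            · exact absurd hs hsa
            · exact Or.inr (Or.inl ⟨Or.inr rfl, h1.mpr (by omega)⟩)
        · have hax : ¬ a = x := fun h => hxa h.symm
          simp [hxa, hax, List.count_cons, List.mem_cons]

-- second pass, with the invariant out = emitted (as lists): it is a filtered Set.ofList build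
theorem pv_emit_fold (dups : PySem.Set String) (l : List String) (e : List String) :
    l.foldl (pvEmitStep dups) (e, e) =
      (l.foldl (fun s x => if dups.contains x then PySem.Set.add s x else s) e,
       l.foldl (fun s x => if dups.contains x then PySem.Set.add s x else s) e) := by
  induction l generalizing e with
  | nil => simp
  | cons a t ih =>
    by_cases hd : a ∈ dups
    · by_cases he : a ∈ e
      · have hadd : PySem.Set.add e a = e := by simp [PySem.Set.add, he]
        simp [List.foldl_cons, pvEmitStep, hd, he, hadd, ih]
      · have hadd : PySem.Set.add e a = e ++ [a] := by simp [PySem.Set.add, he]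
        simp [List.foldl_cons, pvEmitStep, hd, he, hadd, ih]
    · simp [List.foldl_cons, pvEmitStep, hd, ih]

-- the conditional add-fold is the Set.ofList of the filtered list
theorem pv_cond_fold_eq_ofList_filter (dups : PySem.Set String) (l : List String) (e : List String) :
    l.foldl (fun s x => if dups.contains x then PySem.Set.add s x else s) e =
      (l.filter (fun x => dups.contains x)).foldl PySem.Set.add e := by
  induction l generalizing e with
  | nil => simp
  | cons a t ih =>
    simp only [List.foldl_cons, List.filter_cons]
    by_cases hd : PySem.Set.contains dups a = true
    · rw [if_pos hd, if_pos hd, List.foldl_cons]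
      exact ih (PySem.Set.add e a)
    · rw [if_neg hd, if_neg hd]
      exact ih e

-- building a set from a filtered list = filtering the built set
theorem pv_ofList_filter (p : String → Bool) (l e : List String) :
    (l.filter p).foldl PySem.Set.add (e.filter p) = (l.foldl PySem.Set.add e).filter p := by
  induction l generalizing e with
  | nil => simp
  | cons a t ih =>
    by_cases hp : p a
    · by_cases hc : a ∈ e
      · have h1 : PySem.Set.add (e.filter p) a = e.filter p := by
          simp [PySem.Set.add, List.mem_filter, hc, hp]
        have h2 : PySem.Set.add e a = e := by simp [PySem.Set.add, hc]
        rw [List.filter_cons, if_pos hp]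
        simp only [List.foldl_cons]
        rw [h1, h2]
        exact ih e
      · have h1 : PySem.Set.add (e.filter p) a = (e ++ [a]).filter p := by
          simp [PySem.Set.add, List.mem_filter, hc, hp, List.filter_append, List.filter_cons]
        have h2 : PySem.Set.add e a = e ++ [a] := by simp [PySem.Set.add, hc]
        rw [List.filter_cons, if_pos hp]
        simp only [List.foldl_cons]
        rw [h1, h2]
        exact ih (e ++ [a])
    · have h2 : (PySem.Set.add e a).filter p = e.filter p := by
        by_cases hc : a ∈ e
        · simp [PySem.Set.add, hc]
        · simp [PySem.Set.add, hc, List.filter_append, List.filter_cons, hp]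
      rw [List.filter_cons, if_neg hp]
      simp only [List.foldl_cons]
      rw [← h2]
      exact ih (PySem.Set.add e a)

-- core: on any flattened list, A's dict pipeline = B's two-set pipeline
theorem pv_core (all : List String) :
    (((all.foldl (fun d ioc => d.insert ioc (d.getD ioc 0 + 1))
        (PySem.Dict.empty : PySem.Dict String Int)).items.filter
          (fun p => decide (1 < p.2))).map (fun p => p.1)) =
    (all.foldl
        (pvEmitStep ((all.foldl pvDupStep (PySem.Set.empty, PySem.Set.empty)).2))
        ([], PySem.Set.empty)).1 := by
  set dups : PySem.Set String := (all.foldl pvDupStep (PySem.Set.empty, PySem.Set.empty)).2 with hdups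
  -- A side
  rw [PySem.Dict.foldl_insert_getD_add_one_eq_counter, PySem.Dict.items_counter]
  rw [List.filter_map, List.map_map]
  -- B side
  have hinit : (([], PySem.Set.empty) : List String × PySem.Set String)
      = (([] : List String), ([] : List String)) := rfl
  rw [hinit, pv_emit_fold dups all []]
  rw [pv_cond_fold_eq_ofList_filter]
  have hfe : ([] : List String) = ([] : List String).filter (fun x => dups.contains x) := rfl
  rw [hfe, pv_ofList_filter (fun x => dups.contains x) all []]
  have hofl : all.foldl PySem.Set.add ([] : List String) = PySem.Set.ofList all := by
    rw [PySem.Set.ofList_eq_foldl]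
  rw [hofl]
  have hg : ((fun p : String × Int => p.1) ∘ fun k => (k, (all.count k : Int)))
      = fun a : String => a := rfl
  have hh : ((fun p : String × Int => decide (1 < p.2)) ∘ fun k => (k, (all.count k : Int)))
      = fun k : String => decide (1 < (all.count k : Int)) := rfl
  rw [hg, hh, List.map_id']
  apply List.filter_congr
  intro x hx
  have hmem := (pv_dup_fold_mem all PySem.Set.empty PySem.Set.empty x).2
  by_cases h2 : 2 ≤ all.count x
  · have hxd : x ∈ dups := hmem.mpr (Or.inr (Or.inr h2))
    have hcd : dups.contains x = true := by simp [hxd]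
    rw [hcd]
    have h1 : (1 : Int) < (all.count x : Int) := by exact_mod_cast h2
    simp [h1]
  · have hxd : x ∉ dups := by
      intro h
      rcases hmem.mp h with h | ⟨h1, _⟩ | hcc
      · simp [PySem.Set.empty] at h
      · simp [PySem.Set.empty] at h1
      · exact h2 hcc
    have hcd : dups.contains x = false := by simp [hxd]
    rw [hcd]
    have h1 : ¬ (1 : Int) < (all.count x : Int) := by
      intro h; exact h2 (by exact_mod_cast h)
    simp [h1]

-- ===== VERDICT (by name: the statement is the Claim_ definition above) =====
theorem correlate_iocs_spec : Claim_equal_correlate_iocs := by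
  intro xs _
  unfold Spec_correlate_iocs correlate_iocs correlate_iocs_alt
  by_cases h : xs = []
  · simp [h]
  · simp only [h, if_false]
    rw [pv_foldl_append, List.nil_append]
    exact pv_core (xs.flatMap (fun x => x))
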